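-- pv_equiv track=rewrite | github.com/cnrooofx/CS1117 | Sem2/LiveCoding/week3.py | peaks
-- ===== SOURCE A (Python) =====
-- def peaks(numlist):
--     try:
--         if len(numlist) == 0:
--             return False, []
--         out = [numlist[0]]
--         for element in numlist:
--             if element > max(out):
--                 out.append(element)
--         return False, out
--     except:
--         return True, [-1]
-- ===== SOURCE B (Python) =====
-- def peaks(numlist):
--     if not numlist:
--         return False, []
--     # build the full prefix-maximum table first
--     runmax = []
--     m = numlist[0]
--     for x in numlist:
--         m = x if x > m else m
--         runmax.append(m)
--     # one indexed pass: numlist[i] is a record iff it beats the prefix max before it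
--     rest = [x for m, x in zip(runmax, numlist[1:]) if x > m]
--     return False, [numlist[0]] + rest
-- ===== Notes on version B (the rewrite author's own statement) =====
-- stated objective: alternative
-- what changed: B precomputes the prefix-maximum table in one pass and then selects records by a zip/filter pass over the table, instead of A's loop that rescans max(out) at every element.
import Mathlib
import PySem

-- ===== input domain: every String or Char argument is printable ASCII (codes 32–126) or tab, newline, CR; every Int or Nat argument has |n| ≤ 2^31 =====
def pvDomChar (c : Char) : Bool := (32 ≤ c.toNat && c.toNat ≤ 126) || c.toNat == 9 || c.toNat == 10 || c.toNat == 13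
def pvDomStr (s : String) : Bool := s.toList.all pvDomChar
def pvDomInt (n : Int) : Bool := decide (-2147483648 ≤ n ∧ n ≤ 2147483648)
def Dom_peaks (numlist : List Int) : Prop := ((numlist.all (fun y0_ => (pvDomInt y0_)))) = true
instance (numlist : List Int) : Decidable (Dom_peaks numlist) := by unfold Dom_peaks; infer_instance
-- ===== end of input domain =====

-- B builds the prefix-maximum table once, then selects records with a zip/filter pass,
-- replacing A's per-element max(out) rescan (alternative decomposition).


-- ===== PORT A =====
-- the for-loop: append element when it exceeds max(out); out is always nonempty, so
-- Python's max(out) never raises and is ported as (max? out id).getD 0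
def peaksLoopA (xs : List Int) (out : List Int) : List Int :=
  match xs with
  | [] => out
  | x :: rest =>
      if x > (PySem.List.max? out (fun y => y)).getD 0 then
        peaksLoopA rest (out ++ [x])
      else
        peaksLoopA rest out

def peaks (numlist : List Int) : Bool × List Int :=
  match numlist with
  | [] => (false, [])
  | h :: _ => (false, peaksLoopA numlist [h])

-- ===== PORT B =====
-- prefix-maximum table: m starts at numlist[0], updated per element, appended each step
def runmaxAux (xs : List Int) (m : Int) : List Int :=
  match xs with
  | [] => []
  | x :: rest =>
      let m' := if x > m then x else m
      m' :: runmaxAux rest m'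

def peaks_alt (numlist : List Int) : Bool × List Int :=
  match numlist with
  | [] => (false, [])
  | h :: t =>
      let runmax := runmaxAux numlist h
      let rest := ((runmax.zip t).filter (fun p => p.2 > p.1)).map (fun p => p.2)
      (false, h :: rest)

-- ===== PRECONDITION & SPEC =====
def Spec_peaks (numlist : List Int) (out : Bool × List Int) : Prop := out = peaks_alt numlist
instance (numlist : List Int) (out : Bool × List Int) : Decidable (Spec_peaks numlist out) := by unfold Spec_peaks; infer_instance

-- ===== CLAIM (what is proved, stated in full; the proofs are below) =====
def Claim_equal_peaks : Prop := ∀ (numlist : List Int), Dom_peaks numlist → Spec_peaks numlist (peaks numlist)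

-- ===== LEMMAS AND PROOFS =====

-- the record list both programs compute, abstractly
def recs (xs : List Int) (m : Int) : List Int :=
  match xs with
  | [] => []
  | x :: rest => if x > m then x :: recs rest x else recs rest m

lemma maxD_append_gt (out : List Int) (m x : Int)
    (h : (PySem.List.max? out (fun y => y)).getD 0 = m) (hne : out ≠ []) (hx : m < x) :
    (PySem.List.max? (out ++ [x]) (fun y => y)).getD 0 = x := by
  obtain ⟨o, os, rfl⟩ := List.exists_cons_of_ne_nil hne
  simp only [PySem.List.max?_id_cons, Option.getD_some] at h
  rw [List.cons_append]
  simp [PySem.List.max?_id_cons, List.foldl_append, h, max_eq_right (le_of_lt hx)]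

lemma loopA_recs (xs : List Int) (out : List Int) (m : Int)
    (hne : out ≠ []) (h : (PySem.List.max? out (fun y => y)).getD 0 = m) :
    peaksLoopA xs out = out ++ recs xs m := by
  induction xs generalizing out m with
  | nil => simp [peaksLoopA, recs]
  | cons x rest ih =>
      simp only [peaksLoopA, recs, h]
      by_cases hx : x > m
      · simp only [hx, if_pos]
        rw [ih (out ++ [x]) x (by simp) (maxD_append_gt out m x h hne hx)]
        simp
      · simp only [hx, ite_false]
        exact ih out m hne h

lemma zip_filter_recs (t : List Int) (m : Int) :
    (((m :: runmaxAux t m).zip t).filter (fun p => p.2 > p.1)).map (fun p => p.2)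
      = recs t m := by
  induction t generalizing m with
  | nil => simp [recs]
  | cons x rest ih =>
      simp only [runmaxAux, recs, List.zip_cons_cons, List.filter_cons]
      by_cases hx : x > m
      · simp [hx, ih]
      · simp [hx, ih]

-- ===== VERDICT (by name: the statement is the Claim_ definition above) =====
theorem peaks_spec : Claim_equal_peaks := by
  intro numlist _
  unfold Spec_peaks
  match numlist with
  | [] => rfl
  | h :: t =>
      simp only [peaks, peaks_alt, runmaxAux]
      have h1 : (if h > h then h else h) = h := by simp
      rw [h1]
      have hstep : peaksLoopA (h :: t) [h] = peaksLoopA t [h] := by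
        simp [peaksLoopA, PySem.List.max?_id_cons, List.foldl]
      rw [hstep, loopA_recs t [h] h (by simp) (by simp [PySem.List.max?_id_cons, List.foldl])]
      rw [zip_filter_recs t h]
      simp
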